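-- pv_equiv track=rewrite | github.com/virtual-labs/exp-drone-repairing-and-maintenance--II-iitd | experiment/simulation/automate/GenerateImageVideos.py | findStepMediaStartEnd
-- ===== SOURCE A (Python) =====
-- def findStepMediaStartEnd(fileDataLines, toFind: str, endTag = '</div>') -> tuple[int]:
--     startIdx = -1
--     endIdx = -1
--     for i in range(len(fileDataLines)):
--         if fileDataLines[i].__contains__(toFind):
--             startIdx = i
--             # now find after this i'th index
--             for j in range(i+1, len(fileDataLines)):
--                 if fileDataLines[j].__contains__(endTag):
--                     endIdx = j
--                     return (startIdx, endIdx)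
-- ===== SOURCE B (Python) =====
-- def findStepMediaStartEnd(fileDataLines, toFind: str, endTag = '</div>') -> tuple[int]:
--     start = None
--     for i, line in enumerate(fileDataLines):
--         if start is None:
--             if toFind in line:
--                 start = i
--         elif endTag in line:
--             return (start, i)
-- ===== Notes on version B (the rewrite author's own statement) =====
-- stated objective: simpler
-- what changed: Replaces the nested index loops (re-scanning the tail for the end tag after each marker hit) by a single linear pass with a start-index state flag; correctness uses that no end tag after the first marker implies none after any later marker.
import Mathlib
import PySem

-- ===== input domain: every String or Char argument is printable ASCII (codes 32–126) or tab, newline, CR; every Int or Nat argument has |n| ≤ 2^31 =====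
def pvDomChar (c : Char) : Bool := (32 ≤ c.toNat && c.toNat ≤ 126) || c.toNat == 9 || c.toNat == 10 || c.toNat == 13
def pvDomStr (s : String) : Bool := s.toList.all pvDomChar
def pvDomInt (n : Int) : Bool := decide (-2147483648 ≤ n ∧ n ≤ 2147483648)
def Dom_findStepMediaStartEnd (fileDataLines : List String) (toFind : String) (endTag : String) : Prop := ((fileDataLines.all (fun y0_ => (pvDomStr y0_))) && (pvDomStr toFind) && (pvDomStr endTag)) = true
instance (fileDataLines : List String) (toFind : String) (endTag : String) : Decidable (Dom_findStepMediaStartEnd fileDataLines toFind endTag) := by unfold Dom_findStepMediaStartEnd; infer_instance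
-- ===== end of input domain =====

-- ===== PORT A =====
-- Header: B replaces A's nested index loops by one linear pass with a start-state flag (simpler, same results).
-- inner loop of A: for j in range(i+1, len): if endTag in lines[j]: return j
def pvInnerA (ls : List String) (endTag : String) (j : Int) : Option Int :=
  match ls with
  | [] => none
  | l :: rest => if PySem.Str.isIn endTag l then some j else pvInnerA rest endTag (j + 1)

-- outer loop of A over the lines with their index
def pvOuterA (ls : List String) (toFind : String) (endTag : String) (i : Int) : Option (Int × Int) :=
  match ls with
  | [] => none
  | l :: rest =>
    if PySem.Str.isIn toFind l then
      match pvInnerA rest endTag (i + 1) with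
      | some j => some (i, j)
      | none => pvOuterA rest toFind endTag (i + 1)
    else pvOuterA rest toFind endTag (i + 1)

def findStepMediaStartEnd (fileDataLines : List String) (toFind : String) (endTag : String) : Option (Int × Int) :=
  pvOuterA fileDataLines toFind endTag 0

-- ===== PORT B =====
-- B: one pass with state `start : Option Int` (Python's `start = None` flag)
def pvScanB (ls : List String) (toFind : String) (endTag : String) (i : Int) (start : Option Int) : Option (Int × Int) :=
  match ls with
  | [] => none
  | l :: rest =>
    match start with
    | none => if PySem.Str.isIn toFind l then pvScanB rest toFind endTag (i + 1) (some i)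
              else pvScanB rest toFind endTag (i + 1) none
    | some s => if PySem.Str.isIn endTag l then some (s, i)
                else pvScanB rest toFind endTag (i + 1) (some s)

def findStepMediaStartEnd_alt (fileDataLines : List String) (toFind : String) (endTag : String) : Option (Int × Int) :=
  pvScanB fileDataLines toFind endTag 0 none

-- ===== PRECONDITION & SPEC =====
def Spec_findStepMediaStartEnd (fileDataLines : List String) (toFind : String) (endTag : String) (out : Option (Int × Int)) : Prop := out = findStepMediaStartEnd_alt fileDataLines toFind endTag
instance (fileDataLines : List String) (toFind : String) (endTag : String) (out : Option (Int × Int)) : Decidable (Spec_findStepMediaStartEnd fileDataLines toFind endTag out) := by unfold Spec_findStepMediaStartEnd; infer_instance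

-- ===== CLAIM (what is proved, stated in full; the proofs are below) =====
def Claim_equal_findStepMediaStartEnd : Prop := ∀ (fileDataLines : List String) (toFind : String) (endTag : String), Dom_findStepMediaStartEnd fileDataLines toFind endTag → Spec_findStepMediaStartEnd fileDataLines toFind endTag (findStepMediaStartEnd fileDataLines toFind endTag)

-- ===== LEMMAS AND PROOFS =====

-- inner-result noneness does not depend on the running index
theorem pvInnerA_none_any (ls : List String) (e : String) (j j' : Int)
    (h : pvInnerA ls e j = none) : pvInnerA ls e j' = none := by
  induction ls generalizing j j' with
  | nil => simp [pvInnerA]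
  | cons l rest ih =>
    simp only [pvInnerA] at h ⊢
    split_ifs at h ⊢ with hc
    · exact ih (j + 1) (j' + 1) h

-- if no line of the tail contains endTag, A's outer loop can never return
theorem pvOuterA_none_of_inner_none (ls : List String) (t e : String) (i j : Int)
    (h : pvInnerA ls e j = none) : pvOuterA ls t e i = none := by
  induction ls generalizing i j with
  | nil => simp [pvOuterA]
  | cons l rest ih =>
    simp only [pvInnerA] at h
    split_ifs at h with hc
    simp only [pvOuterA]
    split_ifs with ht
    · rw [pvInnerA_none_any rest e (j + 1) (i + 1) h]
      exact ih _ (j + 1) h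
    · exact ih _ (j + 1) h

-- once the start flag is set, B's scan is exactly A's inner loop
theorem pvScanB_found (ls : List String) (t e : String) (i s : Int) :
    pvScanB ls t e i (some s) = (pvInnerA ls e i).map (fun j => (s, j)) := by
  induction ls generalizing i with
  | nil => simp [pvScanB, pvInnerA]
  | cons l rest ih =>
    simp only [pvScanB, pvInnerA]
    split_ifs with hc
    · rfl
    · exact ih _

theorem pvOuterA_eq_pvScanB (ls : List String) (t e : String) (i : Int) :
    pvOuterA ls t e i = pvScanB ls t e i none := by
  induction ls generalizing i with
  | nil => rfl
  | cons l rest ih =>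
    simp only [pvOuterA, pvScanB]
    split_ifs with ht
    · rw [pvScanB_found rest t e (i + 1) i]
      cases hin : pvInnerA rest e (i + 1) with
      | none => simp [pvOuterA_none_of_inner_none rest t e (i + 1) (i + 1) hin]
      | some j => simp
    · exact ih _

-- ===== VERDICT (by name: the statement is the Claim_ definition above) =====
theorem findStepMediaStartEnd_spec : Claim_equal_findStepMediaStartEnd := by
  intro ls t e _
  unfold Spec_findStepMediaStartEnd findStepMediaStartEnd findStepMediaStartEnd_alt
  exact pvOuterA_eq_pvScanB ls t e 0
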